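-- pv_equiv track=rewrite | github.com/supermantou42/leetcode-py | daily/July.py | respace
-- ===== SOURCE A (Python) =====
-- from typing import List
--
-- def respace(dictionary: List[str], sentence: str) -> int:
--     trietree = {}
--     for words in dictionary:
--         t = trietree
--         for char in words[:0:-1]:
--             if char not in t:
--                 t[char] = {}
--             t = t[char]
--         if words[0] not in t:
--             t[words[0]] = {None:"end"}
--         else:
--             t[words[0]][None] = "end"
--
--     n = len(sentence)
--     dp = list(range(n+1))
--
--     for i in range(1,n+1):
--         Flag = True
--         t = trietree
--         for j in range(1,i+1)[::-1]:
--             dp[i] = min(dp[i], dp[j-1] + i - j + 1)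
--             if sentence[j-1] not in t:
--                 Flag = False
--                 break
--             else:
--                 if None in t[sentence[j-1]]:
--                     dp[i] = min(dp[i], dp[j-1])
--                     if len(t[sentence[j-1]]) == 1:
--                         Flag = False
--                         break
--                 t = t[sentence[j-1]]
--         if Flag and None in t:
--             dp[i] = 0
--
--     return dp[-1]
-- ===== SOURCE B (Python) =====
-- def respace(dictionary, sentence):
--     words = set(dictionary)
--     maxlen = 0
--     for w in dictionary:
--         if len(w) > maxlen:
--             maxlen = len(w)
--     n = len(sentence)
--     dp = [0]
--     for i in range(1, n + 1):
--         best = dp[i - 1] + 1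
--         for j in range(max(0, i - maxlen), i):
--             if sentence[j:i] in words and dp[j] < best:
--                 best = dp[j]
--         dp.append(best)
--     return dp[n]
-- ===== Notes on version B (the rewrite author's own statement) =====
-- stated objective: faster
-- what changed: Replaces A's reverse-trie (nested dicts walked backwards from each position with early-exit breaks, updating dp[i] at every step) by a forward DP over a hash set of the dictionary words bounded by the maximum word length: dp[i] = min(dp[i-1]+1, min dp[j] over window starts j with sentence[j:i] in the word set).
import Mathlib
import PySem

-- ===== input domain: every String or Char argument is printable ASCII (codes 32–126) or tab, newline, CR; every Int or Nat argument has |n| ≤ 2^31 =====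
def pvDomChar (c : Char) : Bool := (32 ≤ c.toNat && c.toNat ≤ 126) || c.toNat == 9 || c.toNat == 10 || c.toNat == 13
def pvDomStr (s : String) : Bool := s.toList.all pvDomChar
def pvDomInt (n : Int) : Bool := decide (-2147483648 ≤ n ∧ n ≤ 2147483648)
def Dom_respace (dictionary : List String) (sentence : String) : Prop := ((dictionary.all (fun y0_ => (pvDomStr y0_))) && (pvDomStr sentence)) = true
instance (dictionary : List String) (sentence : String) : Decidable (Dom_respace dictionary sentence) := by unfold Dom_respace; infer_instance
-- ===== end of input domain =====

-- B replaces the reverse-trie walk by a forward DP over a set of the dictionary words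
-- bounded by the maximum word length; equivalence is proved on dictionaries without "".


-- ===== PORT A =====
-- Python nested dict trie {char: subdict, None: "end"}: a node is (end-flag, children
-- in insertion order).  Mutual pair (a nested inductive is not allowed).
mutual
inductive PvTrie where
  | mk : Bool → PvKids → PvTrie
  deriving DecidableEq
inductive PvKids where
  | nil : PvKids
  | cons : Char → PvTrie → PvKids → PvKids
  deriving DecidableEq
end

def pvEnd : PvTrie → Bool
  | .mk e _ => e

def pvKids : PvTrie → PvKids
  | .mk _ k => k

-- 'char in t' / 't[char]' on the children dict
def pvKidsFind : PvKids → Char → Option PvTrie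
  | .nil, _ => none
  | .cons c t r, d => if c = d then some t else pvKidsFind r d

-- 't[char] = v' (overwrite in place, else append — Python dict insertion order)
def pvKidsSet : PvKids → Char → PvTrie → PvKids
  | .nil, d, v => .cons d v .nil
  | .cons c t r, d, v => if c = d then .cons c v r else .cons c t (pvKidsSet r d v)

def pvKidsLen : PvKids → Nat
  | .nil => 0
  | .cons _ _ r => 1 + pvKidsLen r

-- len(t) of a node dict: char keys plus the None key if the end mark is present
def pvLen : PvTrie → Nat
  | .mk e k => pvKidsLen k + (if e then 1 else 0)

-- one word of A's trie-building loop: the walk over words[:0:-1] followed by the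
-- words[0] step visits exactly w.toList.reverse, marking the end at the last char
-- (= words[0]); [] is unreachable under Pre_ (Python raises IndexError on words[0]).
def pvInsert : PvTrie → List Char → PvTrie
  | t, [] => t
  | .mk e k, [c] =>
      match pvKidsFind k c with
      | none => .mk e (pvKidsSet k c (.mk true .nil))
      | some ct => .mk e (pvKidsSet k c (.mk true (pvKids ct)))
  | .mk e k, c :: rest =>
      match pvKidsFind k c with
      | none => .mk e (pvKidsSet k c (pvInsert (.mk false .nil) rest))
      | some ct => .mk e (pvKidsSet k c (pvInsert ct rest))

-- A's inner loop over j = i, i-1, …, 1 (range(1,i+1)[::-1]); returns (dp, Flag, t).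
-- All list indices are Nat: every Python index here is provably in 0..len-1.
def pvInner (s : List Char) (i : Nat) : List Int → PvTrie → List Nat → List Int × Bool × PvTrie
  | dp, t, [] => (dp, true, t)
  | dp, t, j :: js =>
    let dp1 := dp.set i (min (dp.getD i 0) (dp.getD (j-1) 0 + ((i : Int) - (j : Int) + 1)))
    match pvKidsFind (pvKids t) (s.getD (j-1) ' ') with
    | none => (dp1, false, t)                                  -- sentence[j-1] not in t: break
    | some ct =>
      if pvEnd ct then                                          -- None in t[sentence[j-1]]
        let dp2 := dp1.set i (min (dp1.getD i 0) (dp1.getD (j-1) 0))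
        if pvLen ct = 1 then (dp2, false, ct) else pvInner s i dp2 ct js
      else pvInner s i dp1 ct js

def respace (dictionary : List String) (sentence : String) : Int :=
  let trietree := dictionary.foldl (fun t w => pvInsert t w.toList.reverse) (PvTrie.mk false PvKids.nil)
  let s := sentence.toList
  let n := s.length
  let dp0 : List Int := (List.range (n+1)).map (fun k => Int.ofNat k)   -- list(range(n+1))
  let dp := (List.range' 1 n).foldl (fun dp i =>
    let r := pvInner s i dp trietree ((List.range' 1 i).reverse)
    if r.2.1 && pvEnd r.2.2 then r.1.set i 0 else r.1) dp0            -- if Flag and None in t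
  PySem.List.pyGetD dp (-1) 0                                         -- dp[-1] (dp is nonempty)

-- ===== PORT B =====
-- Source B: word set + max word length, forward DP dp[0..n], dp built by append.
-- set(dictionary) is kept as a PySem.Set of the words' char lists (String.toList is
-- injective, so membership of a slice agrees with Source B's set of strings).
def respace_alt (dictionary : List String) (sentence : String) : Int :=
  let words : PySem.Set (List Char) := PySem.Set.ofList (dictionary.map String.toList)
  let maxlen := dictionary.foldl (fun m w => if w.toList.length > m then w.toList.length else m) 0   -- len(w)
  let s := sentence.toList
  let n := s.length
  -- range(max(0, i-maxlen), i) = List.range' (i - maxlen) (i - (i - maxlen)) (Nat sub clamps)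
  let dp := (List.range' 1 n).foldl (fun dp i =>
    let best := dp.getD (i-1) 0 + 1
    let best := (List.range' (i - maxlen) (i - (i - maxlen))).foldl
      (fun b (j : Nat) => if PySem.List.slice s (some (j:Int)) (some (i:Int)) ∈ words ∧ dp.getD j 0 < b
                  then dp.getD j 0 else b) best
    dp ++ [best]) [0]
  dp.getD n 0

-- ===== PRECONDITION & SPEC =====
-- Pre_ excludes dictionaries containing the empty string: A raises IndexError on
-- words[0] while building the trie there; B would return the DP value with "" ignored.
def Pre_respace (dictionary : List String) (sentence : String) : Prop :=
  ∀ w ∈ dictionary, w ≠ ""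
instance (dictionary : List String) (sentence : String) : Decidable (Pre_respace dictionary sentence) := by
  unfold Pre_respace; infer_instance

def pvWitness_respace : List String × String := (["ab", "a"], "aab")

def Spec_respace (dictionary : List String) (sentence : String) (out : Int) : Prop := out = respace_alt dictionary sentence
instance (dictionary : List String) (sentence : String) (out : Int) : Decidable (Spec_respace dictionary sentence out) := by unfold Spec_respace; infer_instance

-- ===== CLAIM (what is proved, stated in full; the proofs are below) =====
def Claim_equal_respace : Prop := ∀ (dictionary : List String) (sentence : String), Dom_respace dictionary sentence → Pre_respace dictionary sentence → Spec_respace dictionary sentence (respace dictionary sentence)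

-- ===== LEMMAS AND PROOFS =====


-- substring sentence[j:i] as a char list
def pvSub (s : List Char) (j i : Nat) : List Char := (s.drop j).take (i - j)

-- min of a base value and a list of candidates
def pvMin (b : Int) (l : List Int) : Int := l.foldl min b

-- the canonical DP step: dp[i] = min(dp[i-1]+1, min{dp[j] | j < i, sentence[j:i] ∈ D})
def pvVstep (D : List (List Char)) (s : List Char) (p : List Int) (i : Nat) : Int :=
  pvMin (p.getD (i-1) 0 + 1)
    ((List.range i).filterMap (fun j => if pvSub s j i ∈ D then some (p.getD j 0) else none))

def pvSpec (D : List (List Char)) (s : List Char) : Nat → List Int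
  | 0 => [0]
  | i+1 => pvSpec D s i ++ [pvVstep D s (pvSpec D s i) (i+1)]

def pvSpecVal (D : List (List Char)) (s : List Char) (k : Nat) : Int :=
  (pvSpec D s k).getD k 0

theorem pvMin_le_base (b : Int) (l : List Int) : pvMin b l ≤ b := by
  induction l generalizing b with
  | nil => exact le_refl b
  | cons x l ih => exact le_trans (ih (min b x)) (min_le_left b x)

theorem pvMin_le_mem : ∀ {l : List Int} (b : Int) {x : Int}, x ∈ l → pvMin b l ≤ x := by
  intro l
  induction l with
  | nil => intro b x hx; cases hx
  | cons y l ih =>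
    intro b x hx
    rcases List.mem_cons.1 hx with h | h
    · subst h
      exact le_trans (pvMin_le_base (min b x) l) (min_le_right b x)
    · exact ih (min b y) h

theorem le_pvMin {c b : Int} {l : List Int} (hb : c ≤ b) (h : ∀ x ∈ l, c ≤ x) :
    c ≤ pvMin b l := by
  induction l generalizing b with
  | nil => exact hb
  | cons y l ih =>
    exact ih (le_min hb (h y List.mem_cons_self)) (fun x hx => h x (List.mem_cons_of_mem _ hx))

theorem length_pvSpec (D : List (List Char)) (s : List Char) (i : Nat) :
    (pvSpec D s i).length = i + 1 := by
  induction i with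
  | zero => rfl
  | succ i ih => simp [pvSpec, ih]

theorem pvSpec_getD (D : List (List Char)) (s : List Char) {k i : Nat} (h : k ≤ i) :
    (pvSpec D s i).getD k 0 = pvSpecVal D s k := by
  induction i with
  | zero => interval_cases k; rfl
  | succ i ih =>
    rcases Nat.lt_or_ge k (i+1) with hk | hk
    · rw [pvSpec, List.getD_append _ _ _ _ (by rw [length_pvSpec]; omega)]
      exact ih (by omega)
    · have : k = i + 1 := by omega
      subst this; rfl

theorem pvSpecVal_succ (D : List (List Char)) (s : List Char) (i : Nat) :
    pvSpecVal D s (i+1) = pvVstep D s (pvSpec D s i) (i+1) := by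
  unfold pvSpecVal
  rw [pvSpec, List.getD_append_right _ _ _ _ (by rw [length_pvSpec])]
  rw [length_pvSpec]; simp

theorem pvSpecVal_nonneg (D : List (List Char)) (s : List Char) (k : Nat) :
    0 ≤ pvSpecVal D s k := by
  induction k using Nat.strong_induction_on with
  | _ k ih =>
    match k with
    | 0 => exact le_refl 0
    | i+1 =>
      rw [pvSpecVal_succ]
      refine le_pvMin ?_ ?_
      · have hi := ih i (by omega)
        simp only [Nat.add_sub_cancel]
        rw [pvSpec_getD D s (le_refl i)]
        omega
      · intro x hx
        rcases List.mem_filterMap.1 hx with ⟨j, hj, hjx⟩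
        have hj' : j ≤ i := by have := List.mem_range.1 hj; omega
        by_cases hm : pvSub s j (i+1) ∈ D
        · rw [if_pos hm] at hjx
          rw [← Option.some.inj hjx, pvSpec_getD D s hj']
          exact ih j (by omega)
        · rw [if_neg hm] at hjx; cases hjx

theorem pvSpecVal_succ_le (D : List (List Char)) (s : List Char) (i : Nat) :
    pvSpecVal D s (i+1) ≤ pvSpecVal D s i + 1 := by
  rw [pvSpecVal_succ]
  refine le_trans (pvMin_le_base _ _) ?_
  simp only [Nat.add_sub_cancel]
  rw [pvSpec_getD D s (le_refl i)]

theorem pvSpecVal_lip (D : List (List Char)) (s : List Char) {a b : Nat} (h : a ≤ b) :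
    pvSpecVal D s b ≤ pvSpecVal D s a + ((b : Int) - (a : Int)) := by
  induction b with
  | zero => have : a = 0 := by omega
            subst this; simp
  | succ b ih =>
    rcases Nat.lt_or_ge a (b+1) with hb | hb
    · have h1 := pvSpecVal_succ_le D s b
      have h2 := ih (by omega)
      push_cast
      omega
    · have : a = b + 1 := by omega
      subst this; simp

def pvReach : PvTrie → List Char → Option PvTrie
  | t, [] => some t
  | t, c :: cs =>
    match pvKidsFind (pvKids t) c with
    | none => none
    | some ct => pvReach ct cs

def pvReachEnd (t : PvTrie) (cs : List Char) : Bool := ((pvReach t cs).map pvEnd).getD false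

-- dict assignment vs lookup on the children list (recursive: PvKids is a mutual inductive)
theorem pvKidsFind_set : ∀ (k : PvKids) (c d : Char) (v : PvTrie),
    pvKidsFind (pvKidsSet k c v) d = if c = d then some v else pvKidsFind k d
  | .nil, c, d, v => by by_cases h : c = d <;> simp [pvKidsSet, pvKidsFind, h]
  | .cons c0 t0 r, c, d, v => by
      by_cases h0 : c0 = c
      · subst h0
        by_cases h : c0 = d <;> simp [pvKidsSet, pvKidsFind, h]
      · by_cases h : c = d
        · subst h
          simp [pvKidsSet, h0, pvKidsFind, pvKidsFind_set r]
        · simp [pvKidsSet, h0, pvKidsFind, pvKidsFind_set r, h]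

theorem pvReach_append (t : PvTrie) (cs ds : List Char) :
    pvReach t (cs ++ ds) = (pvReach t cs).bind (fun u => pvReach u ds) := by
  induction cs generalizing t with
  | nil => simp [pvReach]
  | cons c cs ih =>
    show pvReach t (c :: (cs ++ ds)) = _
    rw [pvReach]
    cases h : pvKidsFind (pvKids t) c with
    | none => simp [pvReach, h]
    | some ct => simp [pvReach, h, ih]

theorem pvKidsLen_zero : ∀ {k : PvKids}, pvKidsLen k = 0 → k = PvKids.nil := by
  intro k h
  cases k with
  | nil => rfl
  | cons c t r => simp [pvKidsLen] at h

theorem pvReachEnd_cons (b : Bool) (k : PvKids) (c : Char) (cs : List Char) :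
    pvReachEnd (PvTrie.mk b k) (c :: cs) =
      (match pvKidsFind k c with
       | none => false
       | some ct => pvReachEnd ct cs) := by
  rw [pvReachEnd, pvReach]
  cases h : pvKidsFind (pvKids (PvTrie.mk b k)) c with
  | none => simp [pvKids] at h; rw [h]; rfl
  | some ct => simp [pvKids] at h; rw [h]; rfl

theorem pvReachEnd_empty (cs : List Char) :
    pvReachEnd (PvTrie.mk false PvKids.nil) cs = false := by
  cases cs with
  | nil => rfl
  | cons c cs => rw [pvReachEnd_cons]; simp [pvKidsFind]

-- inserting (the reversal of) one word marks exactly that path as a word end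
theorem pvInsert_end : ∀ (r : List Char), r ≠ [] → ∀ (t : PvTrie) (cs : List Char),
    pvReachEnd (pvInsert t r) cs = (if cs = r then true else pvReachEnd t cs)
  | [], hr, _, _ => absurd rfl hr
  | [c], _, t, cs => by
      obtain ⟨e, k⟩ := t
      cases cs with
      | nil =>
        cases h : pvKidsFind k c <;>
          simp [pvInsert, pvKids, h, pvReachEnd, pvReach, pvEnd]
      | cons d cs' =>
        by_cases hdc : c = d
        · subst hdc
          cases h : pvKidsFind k c with
          | none =>
            rw [pvInsert]; simp only [pvKids, h]
            cases cs' with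
            | nil => simp [pvReachEnd_cons, pvKidsFind_set, pvReachEnd, pvReach, pvKids, pvEnd]
            | cons d2 cs2 => simp [pvReachEnd_cons, pvKidsFind_set, pvKidsFind, pvKids, h]
          | some ct =>
            obtain ⟨b, kk⟩ := ct
            rw [pvInsert]; simp only [pvKids, h]
            cases cs' with
            | nil => simp [pvReachEnd_cons, pvKidsFind_set, pvReachEnd, pvReach, pvKids, pvEnd]
            | cons d2 cs2 => simp [pvReachEnd_cons, pvKidsFind_set, pvKids, h]
        · have hdc' : d ≠ c := Ne.symm hdc
          cases h : pvKidsFind k c with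
          | none =>
            rw [pvInsert]; simp only [pvKids, h]
            simp [pvReachEnd_cons, pvKidsFind_set, hdc, hdc']
          | some ct =>
            rw [pvInsert]; simp only [pvKids, h]
            simp [pvReachEnd_cons, pvKidsFind_set, hdc, hdc']
  | c :: c2 :: r2, _, t, cs => by
      obtain ⟨e, k⟩ := t
      have hne : (c2 :: r2 : List Char) ≠ [] := by simp
      cases cs with
      | nil =>
        cases h : pvKidsFind k c <;>
          simp [pvInsert, pvKids, h, pvReachEnd, pvReach, pvEnd]
      | cons d cs' =>
        by_cases hdc : c = d
        · subst hdc
          cases h : pvKidsFind k c with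
          | none =>
            rw [pvInsert]; simp only [pvKids, h]
            have hrw := pvInsert_end (c2 :: r2) hne (PvTrie.mk false PvKids.nil) cs'
            rw [pvReachEnd_empty] at hrw
            by_cases hcs : cs' = c2 :: r2
            · subst hcs; simp [pvReachEnd_cons, pvKidsFind_set, h, hrw]
            · simp [pvReachEnd_cons, pvKidsFind_set, h, hrw, hcs]
            all_goals simp
          | some ct =>
            rw [pvInsert]; simp only [pvKids, h]
            have hrw := pvInsert_end (c2 :: r2) hne ct cs'
            by_cases hcs : cs' = c2 :: r2
            · subst hcs; simp [pvReachEnd_cons, pvKidsFind_set, h, hrw]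
            · simp [pvReachEnd_cons, pvKidsFind_set, h, hrw, hcs]
            all_goals simp
        · have hdc' : d ≠ c := Ne.symm hdc
          cases h : pvKidsFind k c with
          | none =>
            rw [pvInsert]; simp only [pvKids, h]
            simp [pvReachEnd_cons, pvKidsFind_set, hdc, hdc']
            all_goals simp
          | some ct =>
            rw [pvInsert]; simp only [pvKids, h]
            simp [pvReachEnd_cons, pvKidsFind_set, hdc, hdc']
            all_goals simp

def pvBuildL (L : List (List Char)) : PvTrie :=
  L.foldl (fun t w => pvInsert t w.reverse) (PvTrie.mk false PvKids.nil)

theorem pvBuild_fold (L : List (List Char)) (h : ∀ w ∈ L, w ≠ []) (t : PvTrie) (cs : List Char) :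
    pvReachEnd (L.foldl (fun t w => pvInsert t w.reverse) t) cs
      = (decide (cs.reverse ∈ L) || pvReachEnd t cs) := by
  induction L generalizing t with
  | nil => simp
  | cons w L ih =>
    rw [List.foldl_cons, ih (fun x hx => h x (List.mem_cons_of_mem _ hx))]
    rw [pvInsert_end w.reverse (by simpa using h w List.mem_cons_self) t cs]
    by_cases hcw : cs = w.reverse
    · have hw : cs.reverse = w := by rw [hcw, List.reverse_reverse]
      simp [hw, hcw]
    · have hw : ¬ cs.reverse = w := fun hh => hcw (by rw [← hh, List.reverse_reverse])
      simp [List.mem_cons, hw, hcw]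

theorem pvReachEnd_build (L : List (List Char)) (h : ∀ w ∈ L, w ≠ []) (cs : List Char) :
    pvReachEnd (pvBuildL L) cs = decide (cs.reverse ∈ L) := by
  rw [pvBuildL, pvBuild_fold L h, pvReachEnd_empty]; simp

theorem pvReach_none_ext {t : PvTrie} {cs : List Char} (h : pvReach t cs = none) (ds : List Char) :
    pvReach t (cs ++ ds) = none := by
  rw [pvReach_append, h]; rfl

theorem pvReach_leaf_ext {t : PvTrie} {cs : List Char} {u : PvTrie} (h : pvReach t cs = some u)
    (hk : pvKids u = PvKids.nil) {ds : List Char} (hd : ds ≠ []) :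
    pvReach t (cs ++ ds) = none := by
  rw [pvReach_append, h]
  cases ds with
  | nil => exact absurd rfl hd
  | cons d ds' => simp [pvReach, hk, pvKidsFind]

-- reversed substring: the characters A's inner walk has consumed after step j = m+1
def pvRsub (s : List Char) (m i : Nat) : List Char := (pvSub s m i).reverse

theorem pvSub_split (s : List Char) {k m i : Nat} (hkm : k ≤ m) (hmi : m ≤ i) :
    pvSub s k i = pvSub s k m ++ pvSub s m i := by
  unfold pvSub
  have h1 : i - k = (m - k) + (i - m) := by omega
  rw [h1, List.take_add, List.drop_drop]
  have h2 : k + (m - k) = m := by omega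
  rw [h2]

theorem pvSub_length (s : List Char) {j i : Nat} (hji : j ≤ i) (hi : i ≤ s.length) :
    (pvSub s j i).length = i - j := by
  unfold pvSub
  rw [List.length_take, List.length_drop]
  omega

theorem pvRsub_snoc (s : List Char) {m i : Nat} (hmi : m < i) (hm : m < s.length) :
    pvRsub s m i = pvRsub s (m+1) i ++ [s.getD m ' '] := by
  unfold pvRsub pvSub
  rw [List.drop_eq_getElem_cons hm]
  have h1 : i - m = (i - (m+1)) + 1 := by omega
  rw [h1, List.take_succ_cons, List.reverse_cons, List.getD_eq_getElem s ' ' hm]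

theorem pvRsub_ext (s : List Char) {k m i : Nat} (hkm : k ≤ m) (hmi : m ≤ i) :
    pvRsub s k i = pvRsub s m i ++ (pvSub s k m).reverse := by
  unfold pvRsub
  rw [pvSub_split s hkm hmi, List.reverse_append]

-- A's inner loop collapsed to the single cell it writes (b = current dp[i], p = the
-- finalized reads dp[0..i-1]); the 'if Flag and None in t' post-check is folded in.
def pvAOut (p : Nat → Int) (i : Nat) (s : List Char) : Int → PvTrie → List Nat → Int
  | b, t, [] => if pvEnd t then 0 else b
  | b, t, j :: js =>
    let b1 := min b (p (j-1) + ((i : Int) - (j : Int) + 1))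
    match pvKidsFind (pvKids t) (s.getD (j-1) ' ') with
    | none => b1
    | some ct =>
      if pvEnd ct then
        let b2 := min b1 (p (j-1))
        if pvLen ct = 1 then b2 else pvAOut p i s b2 ct js
      else pvAOut p i s b1 ct js

theorem pvAOut_congr (i : Nat) (s : List Char) {p q : Nat → Int} :
    ∀ (js : List Nat) (b : Int) (t : PvTrie), (∀ j ∈ js, p (j-1) = q (j-1)) →
    pvAOut p i s b t js = pvAOut q i s b t js := by
  intro js
  induction js with
  | nil => intro b t _; rfl
  | cons j js ih =>
    intro b t h
    have hj := h j List.mem_cons_self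
    have hrest : ∀ x ∈ js, p (x-1) = q (x-1) := fun x hx => h x (List.mem_cons_of_mem _ hx)
    rw [pvAOut, pvAOut, hj]
    cases pvKidsFind (pvKids t) (s.getD (j-1) ' ') with
    | none => rfl
    | some ct =>
      cases he : pvEnd ct with
      | true =>
        by_cases hl : pvLen ct = 1
        · simp [he, hl]
        · simp [he, hl, ih _ ct hrest]
      | false => simp [he, ih _ ct hrest]

theorem pv_getD_set_ne (dp : List Int) {i k : Nat} (h : k ≠ i) (v : Int) :
    (dp.set i v).getD k 0 = dp.getD k 0 := by
  rw [List.getD_eq_getElem?_getD, List.getD_eq_getElem?_getD, List.getElem?_set_ne (Ne.symm h)]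

theorem pv_getD_set_self (dp : List Int) {i : Nat} (h : i < dp.length) (v : Int) :
    (dp.set i v).getD i 0 = v := by
  rw [List.getD_eq_getElem?_getD, List.getElem?_set_self h]; rfl

-- pvInner writes only cell i, so together with the post-check it is a set of pvAOut
theorem pvInner_bridge (s : List Char) (i : Nat) :
    ∀ (js : List Nat) (dp : List Int) (t : PvTrie),
    i < dp.length → (∀ j ∈ js, 1 ≤ j ∧ j ≤ i) →
    (if (pvInner s i dp t js).2.1 && pvEnd (pvInner s i dp t js).2.2
     then (pvInner s i dp t js).1.set i 0 else (pvInner s i dp t js).1)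
      = dp.set i (pvAOut (fun k => dp.getD k 0) i s (dp.getD i 0) t js) := by
  intro js
  induction js with
  | nil =>
    intro dp t hlen _
    rw [pvInner, pvAOut]
    by_cases he : pvEnd t
    · simp [he]
    · rw [if_neg (by simp [he]), if_neg (by simpa using he),
        List.getD_eq_getElem dp 0 hlen, List.set_getElem_self hlen]
  | cons j js ih =>
    intro dp t hlen hjs
    have hji := hjs j List.mem_cons_self
    have hj1 : j - 1 ≠ i := by omega
    rw [pvInner, pvAOut]
    cases hfind : pvKidsFind (pvKids t) (s.getD (j-1) ' ') with
    | none => simp [hfind]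
    | some ct =>
      cases he : pvEnd ct with
      | false =>
        simp only [hfind, he, Bool.false_eq_true, if_false]
        rw [ih _ ct (by simpa using hlen) (fun x hx => hjs x (List.mem_cons_of_mem _ hx))]
        rw [List.set_set, pv_getD_set_self dp hlen]
        congr 1
        apply pvAOut_congr
        intro x hx
        have hxi := hjs x (List.mem_cons_of_mem _ hx)
        have hx1 : x - 1 ≠ i := by omega
        exact pv_getD_set_ne dp hx1 _
      | true =>
        by_cases hl : pvLen ct = 1
        · simp [hfind, he, hl, List.set_set, List.getD_eq_getElem?_getD, List.getElem?_set_self hlen,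
            List.getElem?_set_ne (Ne.symm hj1), min_assoc]
        · simp only [hfind, he, if_true, if_neg hl]
          rw [ih _ ct (by simpa using hlen) (fun x hx => hjs x (List.mem_cons_of_mem _ hx))]
          simp only [List.set_set]
          rw [pv_getD_set_self dp hlen, pv_getD_set_ne dp hj1]
          rw [pv_getD_set_self dp hlen]
          congr 1
          apply pvAOut_congr
          intro x hx
          have hxi := hjs x (List.mem_cons_of_mem _ hx)
          have hx1 : x - 1 ≠ i := by omega
          rw [pv_getD_set_ne dp hx1]

-- the ideal descending accumulation A's inner loop performs (index m is Python's j-1)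
def pvTgt (p : Nat → Int) (D : List (List Char)) (s : List Char) (i : Nat) : Int → Nat → Int
  | b, 0 => b
  | b, m+1 =>
    let b1 := min b (p m + ((i : Int) - (m : Int)))
    pvTgt p D s i (if pvSub s m i ∈ D then min b1 (p m) else b1) m

theorem pvTgt_le (p : Nat → Int) (D : List (List Char)) (s : List Char) (i : Nat) :
    ∀ (m : Nat) (b : Int), pvTgt p D s i b m ≤ b := by
  intro m
  induction m with
  | zero => intro b; exact le_refl b
  | succ m ih =>
    intro b
    rw [pvTgt]
    refine le_trans (ih _) ?_
    by_cases h : pvSub s m i ∈ D <;> simp [h] <;> left <;> exact ⟨le_refl b⟩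

theorem le_pvTgt (p : Nat → Int) (D : List (List Char)) (s : List Char) (i : Nat) :
    ∀ (m : Nat) (b c : Int), c ≤ b → (∀ k, k < m → c ≤ p k + ((i:Int) - (k:Int))) →
      (∀ k, k < m → pvSub s k i ∈ D → c ≤ p k) → c ≤ pvTgt p D s i b m := by
  intro m
  induction m with
  | zero => intro b c hb _ _; exact hb
  | succ m ih =>
    intro b c hb hplain hmatch
    rw [pvTgt]
    refine ih _ c ?_ (fun k hk => hplain k (by omega)) (fun k hk => hmatch k (by omega))
    have h1 : c ≤ min b (p m + ((i:Int) - (m:Int))) :=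
      le_min hb (hplain m (by omega))
    by_cases h : pvSub s m i ∈ D
    · simp only [h, if_pos]
      exact le_min h1 (hmatch m (by omega) h)
    · simpa [h] using h1

theorem pvTgt_le_plain (p : Nat → Int) (D : List (List Char)) (s : List Char) (i : Nat) :
    ∀ (m : Nat) (b : Int) (k : Nat), k < m → pvTgt p D s i b m ≤ p k + ((i:Int) - (k:Int)) := by
  intro m
  induction m with
  | zero => intro b k hk; omega
  | succ m ih =>
    intro b k hk
    rcases Nat.lt_or_ge k m with h | h
    · rw [pvTgt]; exact ih _ k h
    · have hkm : k = m := by omega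
      subst hkm
      rw [pvTgt]
      refine le_trans (pvTgt_le p D s i _ _) ?_
      by_cases h : pvSub s k i ∈ D
      · simp only [h, if_pos]
        exact le_trans (min_le_left _ _) (min_le_right _ _)
      · simp only [h, if_neg, if_false]
        exact min_le_right _ _
    
theorem pvTgt_le_match (p : Nat → Int) (D : List (List Char)) (s : List Char) (i : Nat) :
    ∀ (m : Nat) (b : Int) (k : Nat), k < m → pvSub s k i ∈ D → pvTgt p D s i b m ≤ p k := by
  intro m
  induction m with
  | zero => intro b k hk; omega
  | succ m ih =>
    intro b k hk hmem
    rcases Nat.lt_or_ge k m with h | h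
    · rw [pvTgt]; exact ih _ k h hmem
    · have hkm : k = m := by omega
      subst hkm
      rw [pvTgt]
      refine le_trans (pvTgt_le p D s i _ _) ?_
      simp only [hmem, if_pos]
      exact min_le_right _ _

theorem pvTgt_dom (p : Nat → Int) (D : List (List Char)) (s : List Char) (i : Nat)
    (m : Nat) (b : Int) (hno : ∀ k, k < m → pvSub s k i ∉ D)
    (hdom : ∀ k, k < m → b ≤ p k + ((i:Int) - (k:Int))) :
    pvTgt p D s i b m = b := by
  refine le_antisymm (pvTgt_le p D s i m b) ?_
  exact le_pvTgt p D s i m b b (le_refl b) hdom (fun k hk hmem => absurd hmem (hno k hk))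

-- the descending accumulation started at dp[i] = i equals the canonical min form
theorem pvTgt_eq_V (p : Nat → Int) (D : List (List Char)) (s : List Char) {i : Nat} (hi : 0 < i)
    (HL : ∀ a b : Nat, a ≤ b → b < i → p b ≤ p a + ((b:Int) - (a:Int))) (Hp0 : p 0 = 0) :
    pvTgt p D s i ((i:Int)) i
      = pvMin (p (i-1) + 1)
          ((List.range i).filterMap (fun j => if pvSub s j i ∈ D then some (p j) else none)) := by
  have hc : ((i-1 : Nat) : Int) = (i:Int) - 1 := by omega
  have hbase : p (i-1) ≤ (i:Int) - 1 := by
    have h := HL 0 (i-1) (Nat.zero_le _) (by omega)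
    rw [Hp0, hc] at h
    omega
  apply le_antisymm
  · refine le_pvMin ?_ ?_
    · have h := pvTgt_le_plain p D s i i ((i:Int)) (i-1) (by omega)
      rw [hc] at h
      have : (i:Int) - ((i:Int) - 1) = 1 := by ring
      omega
    · intro x hx
      rcases List.mem_filterMap.1 hx with ⟨j, hj, hjx⟩
      by_cases hm : pvSub s j i ∈ D
      · rw [if_pos hm] at hjx
        rw [← Option.some.inj hjx]
        exact pvTgt_le_match p D s i i _ j (List.mem_range.1 hj) hm
      · rw [if_neg hm] at hjx; cases hjx
  · refine le_pvTgt p D s i i _ _ ?_ ?_ ?_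
    · have h := pvMin_le_base (p (i-1) + 1)
        ((List.range i).filterMap (fun j => if pvSub s j i ∈ D then some (p j) else none))
      omega
    · intro k hk
      have h1 := pvMin_le_base (p (i-1) + 1)
        ((List.range i).filterMap (fun j => if pvSub s j i ∈ D then some (p j) else none))
      have h2 := HL k (i-1) (by omega) (by omega)
      rw [hc] at h2
      omega
    · intro k hk hmem
      exact pvMin_le_mem _ (List.mem_filterMap.2 ⟨k, List.mem_range.2 hk, by rw [if_pos hmem]⟩)

-- membership of the substring in the dictionary, read off the trie walk
theorem pvSub_mem_iff (D : List (List Char)) (hD : ∀ w ∈ D, w ≠ []) (s : List Char) (k i : Nat) :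
    pvReachEnd (pvBuildL D) (pvRsub s k i) = decide (pvSub s k i ∈ D) := by
  rw [pvReachEnd_build D hD, pvRsub, List.reverse_reverse]

theorem pvReach_singleton (u : PvTrie) (c : Char) :
    pvReach u [c] = pvKidsFind (pvKids u) c := by
  rw [pvReach]
  cases h : pvKidsFind (pvKids u) c <;> simp [pvReach]

-- MAIN A LEMMA: the collapsed inner loop computes the ideal descending accumulation
theorem pvAOut_main (D : List (List Char)) (hD : ∀ w ∈ D, w ≠ []) (s : List Char)
    (p : Nat → Int) (i : Nat) (hi : i ≤ s.length) (hipos : 0 < i)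
    (HL : ∀ a b : Nat, a ≤ b → b < i → p b ≤ p a + ((b:Int) - (a:Int)))
    (Hnn : ∀ k, k < i → 0 ≤ p k) (Hp0 : p 0 = 0) :
    ∀ (m : Nat), m ≤ i → ∀ (b : Int) (t : PvTrie),
    pvReach (pvBuildL D) (pvRsub s m i) = some t →
    0 ≤ b → (pvEnd t = true → b ≤ p m) →
    pvAOut p i s b t ((List.range' 1 m).reverse) = pvTgt p D s i b m := by
  intro m
  induction m with
  | zero =>
    intro _ b t hreach hb hinv
    show (if pvEnd t then 0 else b) = b
    by_cases he : pvEnd t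
    · have h1 := hinv he
      rw [Hp0] at h1
      simp [he]; omega
    · simp [he]
  | succ m ih =>
    intro hm b t hreach hb hinv
    have hjs : (List.range' 1 (m+1)).reverse = (m+1) :: (List.range' 1 m).reverse := by
      rw [List.range'_concat, List.reverse_append]
      simp [Nat.add_comm]
    rw [hjs, pvAOut]
    have harr : ((i:Int) - ((m+1 : Nat) : Int) + 1) = (i:Int) - (m:Int) := by push_cast; ring
    simp only [Nat.add_sub_cancel, harr]
    have hmnn := Hnn m (by omega)
    have hb1 : (0:Int) ≤ min b (p m + ((i:Int) - (m:Int))) := le_min hb (by omega)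
    -- one walk step: the child looked up at s[m] is the node of the next consumed prefix
    have hstep : pvReach (pvBuildL D) (pvRsub s m i) = pvKidsFind (pvKids t) (s.getD m ' ') := by
      rw [pvRsub_snoc s (by omega) (by omega), pvReach_append, hreach]
      exact pvReach_singleton t (s.getD m ' ')
    -- dominance of the already-seen plain term over the skipped ones
    have hdom : ∀ (x : Int), x ≤ p m + ((i:Int) - (m:Int)) →
        ∀ k, k < m → x ≤ p k + ((i:Int) - (k:Int)) := by
      intro x hx k hk
      have := HL k m (by omega) (by omega)
      omega
    cases hfind : pvKidsFind (pvKids t) (s.getD m ' ') with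
    | none =>
      have hrm : pvReach (pvBuildL D) (pvRsub s m i) = none := by rw [hstep, hfind]
      have hnomatch : ∀ k, k ≤ m → pvSub s k i ∉ D := by
        intro k hk hmem
        have hext := pvRsub_ext s hk (show m ≤ i by omega)
        have hnone : pvReach (pvBuildL D) (pvRsub s k i) = none := by
          rw [hext]; exact pvReach_none_ext hrm _
        have h2 := pvSub_mem_iff D hD s k i
        rw [pvReachEnd, hnone] at h2
        simp [hmem] at h2
      rw [pvTgt, if_neg (hnomatch m (le_refl m))]
      rw [pvTgt_dom p D s i m _ (fun k hk => hnomatch k (by omega))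
        (fun k hk => hdom _ (min_le_right _ _) k hk)]
    | some ct =>
      have hreach' : pvReach (pvBuildL D) (pvRsub s m i) = some ct := by rw [hstep, hfind]
      have hendiff : pvEnd ct = decide (pvSub s m i ∈ D) := by
        have h2 := pvSub_mem_iff D hD s m i
        rw [pvReachEnd, hreach'] at h2
        simpa using h2
      cases he : pvEnd ct with
      | true =>
        have hmem : pvSub s m i ∈ D := by
          rw [he] at hendiff; exact of_decide_eq_true hendiff.symm
        simp only [he, if_true]
        rw [pvTgt, if_pos hmem]
        by_cases hl : pvLen ct = 1
        · -- leaf: no longer substring can match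
          have hknil : pvKids ct = PvKids.nil := by
            obtain ⟨e, kk⟩ := ct
            have : e = true := he
            subst this
            rw [pvLen] at hl
            simp at hl
            exact pvKidsLen_zero hl
          have hnomatch : ∀ k, k < m → pvSub s k i ∉ D := by
            intro k hk hmem'
            have hext := pvRsub_ext s (show k ≤ m by omega) (show m ≤ i by omega)
            have hnonnil : (pvSub s k m).reverse ≠ [] := by
              have hlen := pvSub_length s (show k ≤ m by omega) (show m ≤ s.length by omega)
              intro hcon
              have : (pvSub s k m).length = 0 := by
                rw [← List.length_reverse, hcon]; rfl
              omega
            have hnone : pvReach (pvBuildL D) (pvRsub s k i) = none := by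
              rw [hext]; exact pvReach_leaf_ext hreach' hknil hnonnil
            have h2 := pvSub_mem_iff D hD s k i
            rw [pvReachEnd, hnone] at h2
            simp [hmem'] at h2
          simp only [hl, if_pos, if_true]
          rw [pvTgt_dom p D s i m _ (fun k hk => hnomatch k hk)
            (fun k hk => hdom _ (le_trans (min_le_left _ _) (min_le_right _ _)) k hk)]
        · simp only [hl, if_neg, if_false]
          exact ih (by omega) _ ct hreach' (le_min hb1 hmnn)
            (fun _ => min_le_right _ _)
      | false =>
        have hmem : pvSub s m i ∉ D := by
          rw [he] at hendiff
          exact of_decide_eq_false hendiff.symm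
        simp only [he, Bool.false_eq_true, if_false]
        rw [pvTgt, if_neg hmem]
        exact ih (by omega) _ ct hreach' hb1 (fun hcon => by rw [hcon] at he; cases he)

-- ===== B side =====

theorem pvMaxFold_le_acc (l : List String) :
    ∀ (a : Nat), a ≤ l.foldl (fun m w => if w.toList.length > m then w.toList.length else m) a := by
  induction l with
  | nil => intro a; exact le_refl a
  | cons w l ih =>
    intro a
    refine le_trans ?_ (ih _)
    show a ≤ (if w.toList.length > a then w.toList.length else a)
    by_cases h : w.toList.length > a
    · rw [if_pos h]; omega
    · rw [if_neg h]

theorem pvMaxFold_ge (l : List String) :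
    ∀ (a : Nat) (w : String), w ∈ l →
      w.toList.length ≤ l.foldl (fun m v => if v.toList.length > m then v.toList.length else m) a := by
  induction l with
  | nil => intro a w hw; cases hw
  | cons v l ih =>
    intro a w hw
    rcases List.mem_cons.1 hw with h | h
    · subst h
      refine le_trans ?_ (pvMaxFold_le_acc l _)
      show w.toList.length ≤ (if w.toList.length > a then w.toList.length else a)
      by_cases h : w.toList.length > a
      · rw [if_pos h]
      · rw [if_neg h]; omega
    · exact ih _ w h

theorem pvFoldl_skip {g : Int → Nat → Int} :
    ∀ (l1 l2 : List Nat), (∀ j ∈ l1, ∀ b, g b j = b) → ∀ (b : Int),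
      (l1 ++ l2).foldl g b = l2.foldl g b := by
  intro l1
  induction l1 with
  | nil => intro l2 _ b; rfl
  | cons j l1 ih =>
    intro l2 h b
    rw [List.cons_append, List.foldl_cons, h j List.mem_cons_self]
    exact ih l2 (fun x hx => h x (List.mem_cons_of_mem _ hx)) b

theorem pvFoldl_min_filterMap (P : Nat → Prop) [DecidablePred P] (v : Nat → Int) :
    ∀ (l : List Nat) (b : Int),
      l.foldl (fun b j => if P j then min b (v j) else b) b
        = pvMin b (l.filterMap (fun j => if P j then some (v j) else none)) := by
  intro l
  induction l with
  | nil => intro b; rfl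
  | cons j l ih =>
    intro b
    by_cases h : P j
    · simp only [List.foldl_cons, List.filterMap_cons, h, if_pos]
      rw [ih]; rfl
    · simp only [List.foldl_cons, List.filterMap_cons, h, if_neg, if_false]
      rw [ih]

-- B's inner fold over the window equals the canonical step
theorem pvB_inner (D : List (List Char)) (s : List Char) (p : List Int)
    (i maxlen : Nat) (hi : i ≤ s.length) (hipos : 0 < i)
    (hword : ∀ w ∈ D, w.length ≤ maxlen) :
    (List.range' (i - maxlen) (i - (i - maxlen))).foldl
        (fun (b : Int) (j : Nat) => if PySem.List.slice s (some (j:Int)) (some (i:Int)) ∈ PySem.Set.ofList D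
                      ∧ p.getD j 0 < b then p.getD j 0 else b)
        (p.getD (i-1) 0 + 1)
      = pvVstep D s p i := by
  have hfun : (fun (b : Int) (j : Nat) =>
        if PySem.List.slice s (some (j:Int)) (some (i:Int)) ∈ PySem.Set.ofList D
           ∧ p.getD j 0 < b then p.getD j 0 else b)
      = (fun (b : Int) (j : Nat) => if pvSub s j i ∈ D then min b (p.getD j 0) else b) := by
    funext b j
    rw [PySem.List.slice_natCast]
    by_cases hm : pvSub s j i ∈ D
    · have hm' : (s.drop j).take (i - j) ∈ PySem.Set.ofList D := by
        rw [PySem.Set.mem_ofList]; exact hm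
      rw [if_pos hm]
      by_cases hlt : p.getD j 0 < b
      · rw [if_pos ⟨hm', hlt⟩, min_eq_right (le_of_lt hlt)]
      · rw [if_neg (fun hc => hlt hc.2), min_eq_left (le_of_not_gt hlt)]
    · have hm' : (s.drop j).take (i - j) ∉ PySem.Set.ofList D := by
        rw [PySem.Set.mem_ofList]; exact hm
      rw [if_neg hm, if_neg (fun hc => hm' hc.1)]
  rw [hfun]
  have hsplit : List.range' 0 (i - maxlen) ++ List.range' (i - maxlen) (i - (i - maxlen))
      = List.range' 0 i := by
    have := List.range'_append (s := 0) (m := i - maxlen) (n := i - (i - maxlen)) (step := 1)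
    simpa [Nat.add_sub_cancel' (Nat.sub_le i maxlen)] using this
  have hnosub : ∀ j ∈ List.range' 0 (i - maxlen), ∀ b : Int,
      (if pvSub s j i ∈ D then min b (p.getD j 0) else b) = b := by
    intro j hj b
    have hj' : j < i - maxlen := by
      have := List.mem_range'_1.1 hj; omega
    have hlen : (pvSub s j i).length = i - j := pvSub_length s (by omega) hi
    rw [if_neg]
    intro hmem
    have := hword _ hmem
    omega
  rw [← pvFoldl_skip (List.range' 0 (i - maxlen)) _ hnosub, hsplit]
  rw [pvFoldl_min_filterMap (fun j => pvSub s j i ∈ D) (fun j => p.getD j 0)]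
  rw [pvVstep, ← List.range_eq_range']

-- ===== assembly =====

-- A's dp array after the first m outer iterations: finalized prefix, untouched tail
def pvASt (D : List (List Char)) (s : List Char) (n m : Nat) : List Int :=
  pvSpec D s m ++ (List.range' (m+1) (n-m)).map (fun k => Int.ofNat k)

theorem pvASt_len (D : List (List Char)) (s : List Char) {n m : Nat} (h : m ≤ n) :
    (pvASt D s n m).length = n + 1 := by
  simp [pvASt, length_pvSpec]
  omega

theorem pvASt_getD_le (D : List (List Char)) (s : List Char) {n m k : Nat} (h : k ≤ m) :
    (pvASt D s n m).getD k 0 = pvSpecVal D s k := by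
  rw [pvASt, List.getD_append _ _ _ _ (by rw [length_pvSpec]; omega)]
  exact pvSpec_getD D s h

theorem pvASt_getD_succ (D : List (List Char)) (s : List Char) {n m : Nat} (h : m < n) :
    (pvASt D s n m).getD (m+1) 0 = ((m+1 : Nat) : Int) := by
  rw [pvASt, List.getD_append_right _ _ _ _ (by rw [length_pvSpec])]
  rw [length_pvSpec]
  have hr : List.range' (m+1) (n-m) = (m+1) :: List.range' (m+2) (n-m-1) := by
    have : n - m = (n - m - 1) + 1 := by omega
    rw [this, List.range'_succ]
    norm_num
  rw [hr]
  simp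

theorem pvASt_set (D : List (List Char)) (s : List Char) {n m : Nat} (h : m < n) :
    (pvASt D s n m).set (m+1) (pvVstep D s (pvSpec D s m) (m+1)) = pvASt D s n (m+1) := by
  rw [pvASt, List.set_append, if_neg (by rw [length_pvSpec]; omega), length_pvSpec]
  have hr : List.range' (m+1) (n-m) = (m+1) :: List.range' (m+2) (n-m-1) := by
    have : n - m = (n - m - 1) + 1 := by omega
    rw [this, List.range'_succ]
    norm_num
  rw [hr]
  simp only [List.map_cons]
  rw [pvASt, pvSpec]
  have h2 : n - (m+1) = n - m - 1 := by omega
  rw [h2, List.append_assoc, List.singleton_append, Nat.sub_self, List.set_cons_zero]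

-- one outer iteration of A, through the bridge and the main lemma
theorem pvA_step (D : List (List Char)) (hD : ∀ w ∈ D, w ≠ []) (s : List Char)
    {n m : Nat} (hn : n = s.length) (h : m < n) :
    (if (pvInner s (m+1) (pvASt D s n m) (pvBuildL D) ((List.range' 1 (m+1)).reverse)).2.1
         && pvEnd (pvInner s (m+1) (pvASt D s n m) (pvBuildL D) ((List.range' 1 (m+1)).reverse)).2.2
     then (pvInner s (m+1) (pvASt D s n m) (pvBuildL D) ((List.range' 1 (m+1)).reverse)).1.set (m+1) 0
     else (pvInner s (m+1) (pvASt D s n m) (pvBuildL D) ((List.range' 1 (m+1)).reverse)).1)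
      = pvASt D s n (m+1) := by
  rw [pvInner_bridge s (m+1) _ _ _ (by rw [pvASt_len D s (by omega : m ≤ n)]; omega)
    (by intro j hj
        rw [List.mem_reverse, List.mem_range'_1] at hj
        omega)]
  have hp : ∀ k, k ≤ m → (pvASt D s n m).getD k 0 = pvSpecVal D s k :=
    fun k hk => pvASt_getD_le D s hk
  rw [pvAOut_main D hD s _ (m+1) (by omega) (by omega)
      (by intro a b hab hb
          rw [hp a (by omega), hp b (by omega)]
          exact pvSpecVal_lip D s hab)
      (by intro k hk
          rw [hp k (by omega)]
          exact pvSpecVal_nonneg D s k)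
      (by rw [hp 0 (by omega)]; rfl)
      (m+1) (le_refl _) _ _
      (by rw [show pvRsub s (m+1) (m+1) = [] from by simp [pvRsub, pvSub]]; rfl)
      (by rw [pvASt_getD_succ D s h]; positivity)
      (fun _ => le_refl _)]
  rw [pvASt_getD_succ D s h]
  rw [pvTgt_eq_V _ D s (by omega)
      (by intro a b hab hb
          rw [hp a (by omega), hp b (by omega)]
          exact pvSpecVal_lip D s hab)
      (by rw [hp 0 (by omega)]; rfl)]
  have hfm : (List.range (m+1)).filterMap
        (fun j => if pvSub s j (m+1) ∈ D then some ((pvASt D s n m).getD j 0) else none)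
      = (List.range (m+1)).filterMap
        (fun j => if pvSub s j (m+1) ∈ D then some ((pvSpec D s m).getD j 0) else none) := by
    apply List.filterMap_congr
    intro j hj
    have hj' : j ≤ m := by have := List.mem_range.1 hj; omega
    rw [pvASt_getD_le D s hj', pvSpec_getD D s hj']
  simp only [Nat.add_sub_cancel]
  rw [hp m (le_refl m), hfm, ← pvSpec_getD D s (le_refl m)]
  rw [show pvMin ((pvSpec D s m).getD m 0 + 1)
        ((List.range (m+1)).filterMap
          (fun j => if pvSub s j (m+1) ∈ D then some ((pvSpec D s m).getD j 0) else none))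
      = pvVstep D s (pvSpec D s m) (m+1) from by rw [pvVstep]; simp]
  exact pvASt_set D s h

theorem pvA_loop (D : List (List Char)) (hD : ∀ w ∈ D, w ≠ []) (s : List Char) :
    ∀ (m : Nat), m ≤ s.length →
    (List.range' 1 m).foldl
      (fun dp i =>
        if (pvInner s i dp (pvBuildL D) ((List.range' 1 i).reverse)).2.1
             && pvEnd (pvInner s i dp (pvBuildL D) ((List.range' 1 i).reverse)).2.2
        then (pvInner s i dp (pvBuildL D) ((List.range' 1 i).reverse)).1.set i 0
        else (pvInner s i dp (pvBuildL D) ((List.range' 1 i).reverse)).1)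
      ((List.range (s.length+1)).map (fun k => Int.ofNat k))
    = pvASt D s s.length m := by
  intro m
  induction m with
  | zero =>
    intro _
    rw [pvASt, pvSpec, List.range_eq_range', List.range'_succ, List.map_cons]
    norm_num
  | succ m ih =>
    intro hm
    have hsplit : List.range' 1 (m+1) = List.range' 1 m ++ [m+1] := by
      rw [List.range'_concat]; norm_num [Nat.add_comm]
    rw [hsplit, List.foldl_append, ih (by omega), List.foldl_cons, List.foldl_nil]
    exact pvA_step D hD s rfl (by omega)

theorem respace_eq (dictionary : List String) (sentence : String)
    (hPre : ∀ w ∈ dictionary, w ≠ "") :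
    respace dictionary sentence
      = pvSpecVal (dictionary.map String.toList) sentence.toList sentence.toList.length := by
  have hD : ∀ w ∈ dictionary.map String.toList, w ≠ [] := by
    intro w hw
    rcases List.mem_map.1 hw with ⟨x, hx, rfl⟩
    simpa [String.toList_eq_nil_iff] using hPre x hx
  have hbuild : dictionary.foldl (fun t w => pvInsert t w.toList.reverse) (PvTrie.mk false PvKids.nil)
      = pvBuildL (dictionary.map String.toList) := by
    rw [pvBuildL, List.foldl_map]
  simp only [respace]
  rw [hbuild, pvA_loop (dictionary.map String.toList) hD sentence.toList
    sentence.toList.length (le_refl _)]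
  have hnil : pvASt (dictionary.map String.toList) sentence.toList
      sentence.toList.length sentence.toList.length
      = pvSpec (dictionary.map String.toList) sentence.toList sentence.toList.length := by
    rw [pvASt, Nat.sub_self]
    simp
  rw [hnil]
  have hne : pvSpec (dictionary.map String.toList) sentence.toList sentence.toList.length ≠ [] := by
    apply List.ne_nil_of_length_pos
    rw [length_pvSpec]; omega
  rw [PySem.List.pyGetD_neg_one _ _ hne, List.getLast_eq_getElem, pvSpecVal]
  rw [List.getD_eq_getElem _ _ (by rw [length_pvSpec]; omega)]
  congr 1
  rw [length_pvSpec]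
  omega

theorem pvB_loop (dictionary : List String) (s : List Char) (maxlen : Nat)
    (hword : ∀ w ∈ dictionary.map String.toList, w.length ≤ maxlen) :
    ∀ (m : Nat), m ≤ s.length →
      (List.range' 1 m).foldl
        (fun dp i =>
          dp ++ [(List.range' (i - maxlen) (i - (i - maxlen))).foldl
            (fun (b : Int) (j : Nat) =>
              if PySem.List.slice s (some (j:Int)) (some (i:Int))
                   ∈ PySem.Set.ofList (dictionary.map String.toList)
                 ∧ dp.getD j 0 < b then dp.getD j 0 else b)
            (dp.getD (i-1) 0 + 1)])
        [0]
      = pvSpec (dictionary.map String.toList) s m := by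
  intro m
  induction m with
  | zero => intro _; rfl
  | succ m ih =>
    intro hm
    have hsplit : List.range' 1 (m+1) = List.range' 1 m ++ [m+1] := by
      rw [List.range'_concat]; norm_num [Nat.add_comm]
    rw [hsplit, List.foldl_append, ih (by omega), List.foldl_cons, List.foldl_nil]
    rw [pvB_inner (dictionary.map String.toList) s _ (m+1) maxlen (by omega) (by omega) hword]
    rfl

theorem respace_alt_eq (dictionary : List String) (sentence : String) :
    respace_alt dictionary sentence
      = pvSpecVal (dictionary.map String.toList) sentence.toList sentence.toList.length := by
  have hword : ∀ w ∈ dictionary.map String.toList,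
      w.length ≤ dictionary.foldl (fun m w => if w.toList.length > m then w.toList.length else m) 0 := by
    intro w hw
    rcases List.mem_map.1 hw with ⟨x, hx, rfl⟩
    exact pvMaxFold_ge dictionary 0 x hx
  simp only [respace_alt]
  rw [pvB_loop dictionary sentence.toList _ hword sentence.toList.length (le_refl _)]
  rw [pvSpecVal]

-- ===== VERDICT (by name: the statement is the Claim_ definition above) =====
theorem respace_spec : Claim_equal_respace := by
  intro dictionary sentence _ hPre
  unfold Spec_respace
  rw [respace_eq dictionary sentence hPre, respace_alt_eq]
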